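-- pv_equiv track=rewrite | github.com/totogr/Tomas-Goncalves-Rei | Materias/Fundamentos de Programacion/cad_list_dicc/Untitled-1.py | validar_nom_ap
-- ===== SOURCE A (Python) =====
-- def validar_nom_ap(campo):
--         num=["0", "1", "2", "3", "4", "5", "6", "7", "8", "9"]
--         if len(campo) < 25:
--                 validada=True
--                 i=0
--                 while i<len(campo) and validada:
--                         if campo[i] in num:
--                                 validada=False
--                         i+=1
--         else:
--                validada=False
--
--         return validada
-- ===== SOURCE B (Python) =====
-- def validar_nom_ap(campo):
--     if len(campo) >= 25:
--         return False
--     for d in "0123456789":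
--         if d in campo:
--             return False
--     return True
-- ===== Notes on version B (the rewrite author's own statement) =====
-- stated objective: alternative
-- what changed: Inverts the traversal: instead of scanning the string character by character with an early-exit flag against a digit list, B loops over the ten digit characters and tests each for substring membership in the string.
import Mathlib
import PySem

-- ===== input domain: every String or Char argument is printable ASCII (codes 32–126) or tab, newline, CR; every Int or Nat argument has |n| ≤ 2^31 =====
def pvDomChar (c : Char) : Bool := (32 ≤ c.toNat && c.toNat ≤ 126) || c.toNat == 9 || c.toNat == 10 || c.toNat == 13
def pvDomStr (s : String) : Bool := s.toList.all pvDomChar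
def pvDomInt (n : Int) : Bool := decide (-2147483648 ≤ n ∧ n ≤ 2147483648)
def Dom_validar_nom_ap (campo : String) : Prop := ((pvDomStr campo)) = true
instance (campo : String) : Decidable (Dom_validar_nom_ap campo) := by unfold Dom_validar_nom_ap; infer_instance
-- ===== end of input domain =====

-- B inverts the traversal: where A scans the string character by character with an early-exit flag, B loops over the ten digit characters and tests each for substring membership (alternative decomposition, same cost).


-- ===== PORT A =====
-- the list 'num' of A
def pvNumA : List Char := ['0','1','2','3','4','5','6','7','8','9']

-- A's while loop: 'while i<len(campo) and validada: if campo[i] in num: validada=False; i+=1'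
def pvLoopA : List Char → Bool → Bool
  | [], validada => validada
  | c :: cs, validada =>
      if validada then pvLoopA cs (if c ∈ pvNumA then false else validada)
      else validada

def validar_nom_ap (campo : String) : Bool :=
  if PySem.Str.len campo < 25 then pvLoopA campo.toList true
  else false

-- ===== PORT B =====
-- B's for loop: 'for d in "0123456789": if d in campo: return False'
def pvLoopB (campo : String) : List Char → Bool
  | [] => true
  | d :: ds => if PySem.Str.isIn (String.ofList [d]) campo then false else pvLoopB campo ds

def validar_nom_ap_alt (campo : String) : Bool :=
  if 25 ≤ PySem.Str.len campo then false
  else pvLoopB campo "0123456789".toList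

-- ===== PRECONDITION & SPEC =====
def Spec_validar_nom_ap (campo : String) (out : Bool) : Prop := out = validar_nom_ap_alt campo
instance (campo : String) (out : Bool) : Decidable (Spec_validar_nom_ap campo out) := by unfold Spec_validar_nom_ap; infer_instance

-- ===== CLAIM (what is proved, stated in full; the proofs are below) =====
def Claim_equal_validar_nom_ap : Prop := ∀ (campo : String), Dom_validar_nom_ap campo → Spec_validar_nom_ap campo (validar_nom_ap campo)

-- ===== LEMMAS AND PROOFS =====
theorem pvLoopA_false (cs : List Char) : pvLoopA cs false = false := by
  cases cs <;> simp [pvLoopA]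

theorem pvLoopA_eq (cs : List Char) :
    pvLoopA cs true = decide (∀ c ∈ cs, c ∉ pvNumA) := by
  induction cs with
  | nil => simp [pvLoopA]
  | cons c cs ih =>
      by_cases h : c ∈ pvNumA
      · simp [pvLoopA, h, pvLoopA_false]
      · simp [pvLoopA, h, ih]

theorem singleton_infix_iff_mem (d : Char) (l : List Char) : [d] <:+: l ↔ d ∈ l := by
  constructor
  · intro h; exact h.sublist.subset (List.mem_singleton_self d)
  · intro h
    obtain ⟨s, t, rfl⟩ := List.append_of_mem h
    exact ⟨s, t, by simp⟩

theorem isIn_single (d : Char) (campo : String) :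
    PySem.Str.isIn (String.ofList [d]) campo = decide (d ∈ campo.toList) := by
  rcases hb : PySem.Str.isIn (String.ofList [d]) campo with _ | _
  · have hb' : PySem.Chars.isIn [d] campo.toList = false := by
      simpa [PySem.Str.isIn_eq, String.toList_ofList] using hb
    have := (PySem.Chars.isIn_eq_false_iff ([d]) campo.toList).1 hb'
    simp [singleton_infix_iff_mem] at this
    simp [this]
  · have hb' : PySem.Chars.isIn [d] campo.toList = true := by
      simpa [PySem.Str.isIn_eq, String.toList_ofList] using hb
    have := (PySem.Chars.isIn_iff_infix ([d]) campo.toList).1 hb'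
    rw [singleton_infix_iff_mem] at this
    simp [this]

theorem pvLoopB_eq (campo : String) (ds : List Char) :
    pvLoopB campo ds = decide (∀ d ∈ ds, d ∉ campo.toList) := by
  induction ds with
  | nil => simp [pvLoopB]
  | cons d ds ih =>
      rw [pvLoopB, isIn_single, ih]
      by_cases h : d ∈ campo.toList <;> simp [h]

-- ===== VERDICT (by name: the statement is the Claim_ definition above) =====
theorem validar_nom_ap_spec : Claim_equal_validar_nom_ap := by
  intro campo _
  unfold Spec_validar_nom_ap validar_nom_ap validar_nom_ap_alt
  rw [pvLoopA_eq, pvLoopB_eq]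
  have hnum : "0123456789".toList = pvNumA := by decide
  rw [hnum]
  split_ifs with h1 h2 h3
  · exact absurd h2 (by omega)
  · simp only [decide_eq_decide]
    constructor
    · intro hall d hd hmem; exact hall d hmem hd
    · intro hall c hc hcn; exact hall c hcn hc
  · rfl
  · exact absurd (by omega : (25:Int) ≤ PySem.Str.len campo) h3
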